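-- pv_equiv track=rewrite | github.com/cpccu/beat-the-champ-2024 | H/51295613_WA_Rafi151_H.py | find_tiling
-- ===== SOURCE A (Python) =====
-- def find_tiling(n):
--     # If n is odd, there is no solution
--     if n % 2 != 0:
--         return -1
--
--     # Initialize the colors and tiling array
--     colors = "abcdefghijklmnopqrstuvwxyz"
--     tiling = [["." for _ in range(n)] for _ in range(4)]
--
--     # Fill the tiling with dominoes
--     for i in range(n // 2):
--         # Determine the color for the current pair of dominoes
--         color = colors[i % len(colors)]
--
--         # Fill the current pair of dominoes with the color
--         tiling[0][2*i] = tiling[0][2*i+1] = color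
--         tiling[1][2*i] = tiling[1][2*i+1] = color
--         tiling[2][2*i] = tiling[2][2*i+1] = color
--         tiling[3][2*i] = tiling[3][2*i+1] = color
--
--     # Convert the tiling array to strings
--     tiling_strings = ["".join(row) for row in tiling]
--
--     # Return the tiling
--     return tiling_strings
-- ===== SOURCE B (Python) =====
-- def find_tiling(n):
--     # If n is odd, there is no solution
--     if n % 2 != 0:
--         return -1
--     # The coloring is periodic with period 52 = 2 * 26: precompute one full period
--     # ("aabb...zz") and build a row by repetition + slicing instead of per-cell fills.
--     period = "".join(2 * c for c in "abcdefghijklmnopqrstuvwxyz")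
--     row = (period * (n // 52 + 1))[:n]
--     return [row] * 4
-- ===== Notes on version B (the rewrite author's own statement) =====
-- stated objective: alternative
-- what changed: B exploits the periodicity of the coloring: it precomputes one fixed period string ('aabb...zz', one doubled letter per alphabet character) and builds the row by repeating that string enough times and slicing it to the requested width, returning four copies, instead of A's per-cell fill of a 4xN grid computing a letter for every column pair.
-- outside the precondition, e.g. on find_tiling(3): A returns -1, B returns -1; on find_tiling(-1): A returns -1, B returns -1
import Mathlib
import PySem

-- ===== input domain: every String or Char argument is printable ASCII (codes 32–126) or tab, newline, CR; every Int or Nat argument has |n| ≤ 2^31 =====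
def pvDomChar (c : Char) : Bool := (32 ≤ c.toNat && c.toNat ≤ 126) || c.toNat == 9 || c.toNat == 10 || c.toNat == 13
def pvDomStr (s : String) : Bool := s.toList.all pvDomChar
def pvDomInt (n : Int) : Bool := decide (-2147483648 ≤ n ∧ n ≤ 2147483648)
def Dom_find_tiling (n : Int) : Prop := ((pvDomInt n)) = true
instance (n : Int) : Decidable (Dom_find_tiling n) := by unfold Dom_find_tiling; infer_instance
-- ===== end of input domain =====

-- B builds the row from a precomputed 52-char period by repetition + slicing instead of
-- filling a 4xN grid cell by cell; objective: alternative (same O(n) cost).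
-- ===== PORT A =====
def pvColors : List Char := "abcdefghijklmnopqrstuvwxyz".toList

-- color = colors[i % len(colors)] — the index is always in [0,26) so pyGet? is some; getD is the exact char
def pvColor (i : Int) : Char :=
  (PySem.List.pyGet? pvColors (PySem.Int.mod i (pvColors.length))).getD ' '

def find_tiling (n : Int) : List String :=
  -- Python A returns -1 (an int, not a list of strings) on odd n; excluded by Pre_find_tiling
  if PySem.Int.mod n 2 ≠ 0 then []
  else
    -- for i in range(n // 2): set positions 2i and 2i+1 of each of the four rows of the grid
    -- tiling = [["." for _ in range(n)] for _ in range(4)], then ["".join(row) for row in tiling]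
    ((PySem.List.pyRange 0 (PySem.Int.floordiv n 2) 1).foldl
        (fun t i =>
          t.map (fun row => (row.set (2 * i).toNat (pvColor i)).set (2 * i + 1).toNat (pvColor i)))
        ((List.range 4).map (fun _ => (PySem.List.pyRange 0 n 1).map (fun _ => '.')))).map
      (fun row => String.ofList row)

-- ===== PORT B =====
-- period = "".join(2 * c for c in "abcdefghijklmnopqrstuvwxyz")  (52 chars, "aabb...zz")
def pvPeriod : List Char := (pvColors.map (fun c => [c, c])).flatten

def find_tiling_alt (n : Int) : List String :=
  if PySem.Int.mod n 2 ≠ 0 then []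
  else
    -- row = (period * (n // 52 + 1))[:n]; Python str * k is "" for k ≤ 0, exactly what .toNat gives
    List.replicate 4 (String.ofList
      (PySem.List.slice (List.flatten (List.replicate (PySem.Int.floordiv n 52 + 1).toNat pvPeriod))
        none (some n)))

-- ===== PRECONDITION & SPEC =====
-- Pre_ excludes odd n, on which Python A (and B) returns -1, an int that is not a value of the
-- declared List String return type and hence not portable; both programs agree there anyway.
def Pre_find_tiling (n : Int) : Prop := PySem.Int.mod n 2 = 0
instance (n : Int) : Decidable (Pre_find_tiling n) := by unfold Pre_find_tiling; infer_instance
def pvWitness_find_tiling : Int := (6)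
def Spec_find_tiling (n : Int) (out : List String) : Prop := out = find_tiling_alt n
instance (n : Int) (out : List String) : Decidable (Spec_find_tiling n out) := by unfold Spec_find_tiling; infer_instance

-- ===== CLAIM (what is proved, stated in full; the proofs are below) =====
def Claim_equal_find_tiling : Prop := ∀ (n : Int), Dom_find_tiling n → Pre_find_tiling n → Spec_find_tiling n (find_tiling n)

-- ===== LEMMAS AND PROOFS =====

-- the fold that maps every row with the same step equals mapping each row by the whole fold
theorem pv_foldl_map_rows {α β : Type} (l : List α) (g : α → β → β) (t : List β) :
    l.foldl (fun t i => t.map (g i)) t = t.map (fun r => l.foldl (fun r i => g i r) r) := by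
  induction l generalizing t with
  | nil => simp
  | cons a l ih => simp [List.foldl_cons, ih, List.map_map, Function.comp]

theorem pv_flatten_pairs_length {α : Type} (c : Nat → α) (m : Nat) :
    (((List.range m).map (fun i => [c i, c i])).flatten).length = 2 * m := by
  induction m with
  | zero => simp
  | succ k ih => rw [List.range_succ]; simp_all; omega

-- evaluating A's per-row fill loop over List.range
theorem pv_fill_eval (c : Nat → Char) (m : Nat) (base : List Char) (hb : 2 * m ≤ base.length) :
    (List.range m).foldl (fun r i => (r.set (2 * i) (c i)).set (2 * i + 1) (c i)) base
      = ((List.range m).map (fun i => [c i, c i])).flatten ++ base.drop (2 * m) := by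
  induction m with
  | zero => simp
  | succ m ih =>
    have hm : 2 * m ≤ base.length := by omega
    have hlen := pv_flatten_pairs_length c m
    rw [List.range_succ, List.foldl_append, List.foldl_cons, List.foldl_nil, ih hm]
    have hne1 : base.drop (2 * m) ≠ [] := by
      intro hcon; have := congrArg List.length hcon; simp at this; omega
    obtain ⟨x, t1, h1⟩ := List.exists_cons_of_ne_nil hne1
    have hne2 : t1 ≠ [] := by
      intro hcon; have := congrArg List.length h1; simp [hcon] at this; omega
    obtain ⟨y, t2, h2⟩ := List.exists_cons_of_ne_nil hne2
    have hdrop2 : base.drop (2 * (m + 1)) = t2 := by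
      have hd : base.drop (2 * (m + 1)) = (base.drop (2 * m)).drop 2 := by
        rw [List.drop_drop]; ring_nf
      rw [hd, h1, h2]; rfl
    rw [h1, h2, hdrop2, List.set_append_right _ _ (by omega), List.set_append_right _ _ (by omega),
      hlen]
    have i1 : 2 * m - 2 * m = 0 := by omega
    have i2 : 2 * m + 1 - 2 * m = 1 := by omega
    rw [i1, i2]
    simp

-- element j of a flattened list of pairs [c,c] is the pair source at j/2
theorem pv_pair_flatten_get {α : Type} (xs : List α) (a : Nat) (h : a < xs.length) :
    ((xs.map (fun c => [c, c])).flatten)[2 * a]? = some xs[a] ∧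
    ((xs.map (fun c => [c, c])).flatten)[2 * a + 1]? = some xs[a] := by
  induction xs generalizing a with
  | nil => simp at h
  | cons x xs ih =>
    cases a with
    | zero => simp
    | succ b =>
      have hb : b < xs.length := by simpa using h
      have h1 : 2 * (b + 1) = (2 * b) + 2 := by omega
      have h2 : 2 * (b + 1) + 1 = (2 * b + 1) + 2 := by omega
      obtain ⟨e1, e2⟩ := ih b hb
      constructor
      · rw [h1]; simpa using e1
      · rw [h2]; simpa using e2

-- element j of m concatenated copies of a nonempty list is element j % length
theorem pv_flatten_replicate_get {α : Type} (xs : List α) (m j : Nat)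
    (_hx : 0 < xs.length) (hj : j < m * xs.length) :
    ((List.replicate m xs).flatten)[j]? = xs[j % xs.length]? := by
  induction m generalizing j with
  | zero => omega
  | succ m ih =>
    rw [List.replicate_succ, List.flatten_cons]
    by_cases hlt : j < xs.length
    · rw [List.getElem?_append_left hlt, Nat.mod_eq_of_lt hlt]
    · rw [Nat.not_lt] at hlt
      have hsm : (m + 1) * xs.length = m * xs.length + xs.length := by ring
      rw [List.getElem?_append_right hlt, ih (j - xs.length) (by omega)]
      have hj2 : j = xs.length + (j - xs.length) := by omega
      conv_rhs => rw [hj2]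
      rw [Nat.add_mod_left]

-- the color letter of column pair j, as plain Nat indexing
def pvColN (j : Nat) : Char := pvColors.getD (j % 26) ' '

-- the first 2k characters of enough copies of the period are exactly the k color pairs
theorem pv_take_replicate (k m : Nat) (hk : 2 * k ≤ 52 * m) :
    ((List.range k).map (fun j => [pvColN j, pvColN j])).flatten
      = ((List.replicate m pvPeriod).flatten).take (2 * k) := by
  induction k with
  | zero => simp
  | succ k ih =>
    have hk' : 2 * k ≤ 52 * m := by omega
    have hlenP : pvPeriod.length = 52 := by decide
    have hlenC : pvColors.length = 26 := by decide
    have hget : ∀ j, j < 52 * m →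
        ((List.replicate m pvPeriod).flatten)[j]? = pvPeriod[j % 52]? := by
      intro j hj
      rw [pv_flatten_replicate_get pvPeriod m j (by rw [hlenP]; omega) (by rw [hlenP]; omega),
        hlenP]
    have ha : k % 26 < pvColors.length := by rw [hlenC]; omega
    obtain ⟨p1, p2⟩ := pv_pair_flatten_get pvColors (k % 26) ha
    have hcd : pvColors[k % 26] = pvColN k := (List.getD_eq_getElem pvColors ' ' ha).symm
    rw [hcd] at p1 p2
    have hm1 : (2 * k) % 52 = 2 * (k % 26) := by omega
    have hm2 : (2 * k + 1) % 52 = 2 * (k % 26) + 1 := by omega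
    have g1 : ((List.replicate m pvPeriod).flatten)[2 * k]? = some (pvColN k) := by
      rw [hget (2 * k) (by omega), hm1]; exact p1
    have g2 : ((List.replicate m pvPeriod).flatten)[2 * k + 1]? = some (pvColN k) := by
      rw [hget (2 * k + 1) (by omega), hm2]; exact p2
    rw [List.range_succ, List.map_append, List.flatten_append, ih hk']
    have e1 : 2 * (k + 1) = (2 * k + 1) + 1 := by omega
    rw [e1, List.take_add_one, List.take_add_one, g1, g2]
    simp

-- pvColor at a nonnegative (cast) index is the plain Nat-indexed color
theorem pv_color_natCast (j : Nat) : pvColor (j : Int) = pvColN j := by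
  have hlenC : pvColors.length = 26 := by decide
  unfold pvColor pvColN
  rw [hlenC]
  have hmod : PySem.Int.mod (j : Int) ((26 : Nat) : Int) = ((j % 26 : Nat) : Int) :=
    PySem.Int.mod_natCast j 26
  rw [hmod]
  have hlt : j % 26 < pvColors.length := by rw [hlenC]; omega
  rw [PySem.List.pyGet?_natCast]
  rw [List.getElem?_eq_getElem hlt, List.getD_eq_getElem pvColors ' ' hlt]
  rfl

-- main equality for even n
theorem pv_main (n : Int) (h : PySem.Int.mod n 2 = 0) :
    find_tiling n = find_tiling_alt n := by
  have h2 : (2 : Int) ∣ n := (PySem.Int.mod_eq_zero_iff_dvd n 2).mp h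
  have hcnd : ¬ (PySem.Int.mod n 2 ≠ 0) := not_not_intro h
  unfold find_tiling find_tiling_alt
  rw [if_neg hcnd, if_neg hcnd]
  rcases h2 with ⟨m, hm⟩
  have hfd : PySem.Int.floordiv n 2 = m := by
    rw [PySem.Int.floordiv_eq_ediv_of_pos (by omega)]; omega
  rcases le_or_gt 0 m with hm0 | hm0
  · -- n = 2*k ≥ 0
    obtain ⟨k, rfl⟩ := Int.eq_ofNat_of_zero_le hm0
    have hrange : PySem.List.pyRange 0 (k : Int) 1 = List.map (fun j : Nat => (j : Int)) (List.range k) := by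
      rw [PySem.List.pyRange_one]
      have hk : ((k : Int) - 0).toNat = k := by omega
      rw [hk]
      apply List.map_congr_left
      intro j _
      omega
    have hrangen : PySem.List.pyRange 0 n 1 = List.map (fun j : Nat => (j : Int)) (List.range (2 * k)) := by
      rw [PySem.List.pyRange_one]
      have hk : (n - 0).toNat = 2 * k := by omega
      rw [hk]
      apply List.map_congr_left
      intro j _
      omega
    have hfd52 : PySem.Int.floordiv n 52 = n / 52 := PySem.Int.floordiv_eq_ediv_of_pos (by omega)
    have hbound : 2 * k ≤ 52 * (PySem.Int.floordiv n 52 + 1).toNat := by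
      rw [hfd52]; omega
    have hslice :
        PySem.List.slice ((List.replicate (PySem.Int.floordiv n 52 + 1).toNat pvPeriod).flatten)
          none (some n)
        = ((List.replicate (PySem.Int.floordiv n 52 + 1).toNat pvPeriod).flatten).take (2 * k) := by
      rw [PySem.List.slice_to _ (by omega)]
      congr 1
      omega
    rw [hfd, hrange, hrangen, pv_foldl_map_rows, hslice]
    have hrow :
        (List.map (fun j : Nat => (j : Int)) (List.range k)).foldl
          (fun (r : List Char) i => (r.set (2 * i).toNat (pvColor i)).set (2 * i + 1).toNat (pvColor i))
          ((List.range (2 * k)).map (fun _ => '.'))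
        = ((List.replicate (PySem.Int.floordiv n 52 + 1).toNat pvPeriod).flatten).take (2 * k) := by
      rw [List.foldl_map]
      have hcast : ∀ j : Nat, ((2 : Int) * (j : Int)).toNat = 2 * j := fun j => by omega
      have hcast1 : ∀ j : Nat, ((2 : Int) * (j : Int) + 1).toNat = 2 * j + 1 := fun j => by omega
      simp only [hcast, hcast1]
      rw [pv_fill_eval (fun j => pvColor (j : Int)) k _ (by simp)]
      rw [List.drop_of_length_le (by simp)]
      rw [← pv_take_replicate k _ hbound]
      simp only [pv_color_natCast]
      simp
    rw [show List.range 4 = [0, 1, 2, 3] from by decide]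
    simp only [List.map_cons, List.map_nil, List.map_map, Function.comp_def]
    rw [hrow]
    rfl
  · -- n = 2*m < 0: both sides are four empty strings
    have hr1 : PySem.List.pyRange 0 m 1 = [] := by
      rw [PySem.List.pyRange_one]
      have hz : (m - 0).toNat = 0 := by omega
      rw [hz]; rfl
    have hr2 : PySem.List.pyRange 0 n 1 = [] := by
      rw [PySem.List.pyRange_one]
      have hz : (n - 0).toNat = 0 := by omega
      rw [hz]; rfl
    have hq0 : (PySem.Int.floordiv n 52 + 1).toNat = 0 := by
      rw [PySem.Int.floordiv_eq_ediv_of_pos (by omega)]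
      omega
    rw [hfd, hr1, hr2, hq0]
    simp [PySem.List.slice, PySem.List.clampIdx, List.replicate]

-- ===== VERDICT (by name: the statement is the Claim_ definition above) =====
theorem find_tiling_spec : Claim_equal_find_tiling := by
  intro n _ hpre
  unfold Spec_find_tiling
  exact pv_main n hpre
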